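-- pv_equiv track=rewrite | github.com/manisaurabhcode/python_tele_fab | prompts/report_optimize.py | _generate_policy_table
-- ===== SOURCE A (Python) =====
-- def _generate_policy_table(analysis: dict) -> str:
--     """Generate policy breakdown table"""
--     policies = analysis.get("policies_analysis", [])
--     if not policies:
--         return "No policies found."
--
--     # Count by type
--     types = {}
--     for p in policies:
--         ptype = p.get("policy_type", "Unknown")
--         types[ptype] = types.get(ptype, 0) + 1
--
--     table = "| Policy Type | Count |\n|-------------|-------|\n"
--     for ptype, count in sorted(types.items()):
--         table += f"| {ptype} | {count} |\n"
--
--     return table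
-- ===== SOURCE B (Python) =====
-- def _generate_policy_table(analysis: dict) -> str:
--     """Generate policy breakdown table (sort-then-group instead of hash counting)"""
--     policies = analysis.get("policies_analysis", [])
--     if not policies:
--         return "No policies found."
--
--     types = sorted(p.get("policy_type", "Unknown") for p in policies)
--
--     rows = []
--     i, n = 0, len(types)
--     while i < n:
--         j = i
--         while j < n and types[j] == types[i]:
--             j += 1
--         rows.append(f"| {types[i]} | {j - i} |\n")
--         i = j
--
--     return "| Policy Type | Count |\n|-------------|-------|\n" + "".join(rows)
-- ===== Notes on version B (the rewrite author's own statement) =====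
-- stated objective: alternative
-- what changed: Replaces A's hash-map counting (dict of per-type counts, then sorting the items) by sort-then-group: sort the list of policy-type strings once and emit one row per consecutive run of equal values.
import Mathlib
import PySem

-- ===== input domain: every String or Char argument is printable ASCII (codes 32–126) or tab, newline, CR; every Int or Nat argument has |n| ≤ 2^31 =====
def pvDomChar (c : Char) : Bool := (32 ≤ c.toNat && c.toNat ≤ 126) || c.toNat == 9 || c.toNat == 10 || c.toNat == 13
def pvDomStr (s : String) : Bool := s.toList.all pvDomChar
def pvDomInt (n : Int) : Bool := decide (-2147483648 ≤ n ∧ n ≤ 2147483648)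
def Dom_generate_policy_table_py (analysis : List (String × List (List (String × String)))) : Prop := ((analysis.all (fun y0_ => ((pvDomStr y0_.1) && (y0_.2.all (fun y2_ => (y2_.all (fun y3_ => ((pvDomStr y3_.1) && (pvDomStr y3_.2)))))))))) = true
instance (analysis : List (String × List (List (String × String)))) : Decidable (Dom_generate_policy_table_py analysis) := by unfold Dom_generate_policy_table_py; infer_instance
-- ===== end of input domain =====

-- B replaces A's hash-map counting (dict of counts, then sort the items) by sort-then-group:
-- it sorts the list of policy-type strings once and emits one row per consecutive run (idiomatic sort+groupby).

-- ===== PORT A =====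
def generate_policy_table_py (analysis : List (String × List (List (String × String)))) : String :=
  let policies := (PySem.Dict.mk analysis).getD "policies_analysis" []
  if policies = [] then "No policies found."
  else
    let types := policies.foldl (fun d p =>
      let ptype := (PySem.Dict.mk p).getD "policy_type" "Unknown"
      d.insert ptype (d.getD ptype 0 + 1)) (PySem.Dict.empty : PySem.Dict String Int)
    let table := "| Policy Type | Count |\n|-------------|-------|\n"
    (PySem.List.sorted2 types.items Prod.fst Prod.snd).foldl
      (fun t kc => t ++ ("| " ++ kc.1 ++ " | " ++ PySem.Int.toStr kc.2 ++ " |\n")) table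

-- ===== PORT B =====
-- the inner `while` scan of Source B: one run of equal elements at the front, then recurse on the remainder
def pvGroupRuns : List String → List (String × Int)
  | [] => []
  | x :: rest =>
      (x, (1 : Int) + (rest.takeWhile (fun y => x == y)).length) ::
        pvGroupRuns (rest.dropWhile (fun y => x == y))
termination_by l => l.length
decreasing_by
  simp only [List.length_cons]
  exact Nat.lt_succ_of_le (List.length_dropWhile_le _ _)

def generate_policy_table_py_alt (analysis : List (String × List (List (String × String)))) : String :=
  let policies := (PySem.Dict.mk analysis).getD "policies_analysis" []
  if policies = [] then "No policies found."
  else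
    let types := PySem.List.sorted
      (policies.map (fun p => (PySem.Dict.mk p).getD "policy_type" "Unknown")) (fun x => x) false
    "| Policy Type | Count |\n|-------------|-------|\n" ++
      String.join ((pvGroupRuns types).map
        (fun kc => "| " ++ kc.1 ++ " | " ++ PySem.Int.toStr kc.2 ++ " |\n"))

-- ===== PRECONDITION & SPEC =====
def Spec_generate_policy_table_py (analysis : List (String × List (List (String × String)))) (out : String) : Prop := out = generate_policy_table_py_alt analysis
instance (analysis : List (String × List (List (String × String)))) (out : String) : Decidable (Spec_generate_policy_table_py analysis out) := by unfold Spec_generate_policy_table_py; infer_instance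

-- ===== CLAIM (what is proved, stated in full; the proofs are below) =====
def Claim_equal_generate_policy_table_py : Prop := ∀ (analysis : List (String × List (List (String × String)))), Dom_generate_policy_table_py analysis → Spec_generate_policy_table_py analysis (generate_policy_table_py analysis)

-- ===== LEMMAS AND PROOFS =====

-- insertBy only looks at `before x y` for y in the list
lemma pv_insertBy_congr (b1 b2 : (String × Int) → (String × Int) → Bool) (x : String × Int)
    (ys : List (String × Int)) (h : ∀ y ∈ ys, b1 x y = b2 x y) :
    PySem.List.insertBy b1 x ys = PySem.List.insertBy b2 x ys := by
  induction ys with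
  | nil => rfl
  | cons y ys ih =>
      simp only [PySem.List.insertBy]
      rw [h y (by simp)]
      by_cases hb : b2 x y = true
      · simp [hb]
      · simp only [Bool.not_eq_true] at hb
        simp [hb, ih (fun z hz => h z (by simp [hz]))]

lemma pv_foldl_insertBy_congr (b1 b2 : (String × Int) → (String × Int) → Bool)
    (S : List (String × Int)) (hagree : ∀ a ∈ S, ∀ b ∈ S, b1 a b = b2 a b) :
    ∀ (l acc : List (String × Int)), (∀ a ∈ l, a ∈ S) → (∀ a ∈ acc, a ∈ S) →
    l.foldl (fun acc x => PySem.List.insertBy b1 x acc) acc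
      = l.foldl (fun acc x => PySem.List.insertBy b2 x acc) acc := by
  intro l
  induction l with
  | nil => intro acc _ _; rfl
  | cons x l ih =>
      intro acc hl hacc
      simp only [List.foldl_cons]
      rw [pv_insertBy_congr b1 b2 x acc (fun y hy => hagree x (hl x (by simp)) y (hacc y hy))]
      exact ih _ (fun a ha => hl a (by simp [ha]))
        (fun a ha => by
          rcases (PySem.List.insertBy_mem_iff (before := b2) (x := x) (ys := acc) (y := a)).mp ha with h | h
          · exact h ▸ hl x (by simp)
          · exact hacc a h)

-- sorted2 on pairs whose second component is a function of the first is sorting by the first component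
lemma pv_sorted2_eq_sorted_fst (ks : List String) (f : String → Int) :
    PySem.List.sorted2 (ks.map (fun k => (k, f k))) Prod.fst Prod.snd false
      = PySem.List.sorted (ks.map (fun k => (k, f k))) Prod.fst false := by
  rw [PySem.List.sorted_eq_foldl_insertBy]
  refine pv_foldl_insertBy_congr
    (fun a b => decide (a.1 < b.1) || (!decide (b.1 < a.1) && decide (a.2 < b.2)))
    (fun a b => decide (a.1 < b.1))
    (ks.map (fun k => (k, f k))) ?_ _ [] (fun a ha => ha) (by simp)
  intro a ha b hb
  obtain ⟨k, _, rfl⟩ := List.mem_map.mp ha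
  obtain ⟨k', _, rfl⟩ := List.mem_map.mp hb
  rcases lt_trichotomy k k' with h | h | h
  · simp [h]
  · subst h; simp
  · simp [h, h.asymm]

-- run-length grouping of a sorted list lists each distinct value with its count, in sorted order
lemma pv_groupRuns_sorted (u : List String) (hu : u.Pairwise (· ≤ ·)) :
    pvGroupRuns u = (PySem.List.sorted (PySem.Set.ofList u) (fun x => x) false).map
      (fun k => (k, (u.count k : Int))) := by
  induction u using pvGroupRuns.induct with
  | case1 => simp only [pvGroupRuns]; rfl
  | case2 x rest ih =>
      have hxle : ∀ z ∈ rest, x ≤ z := (List.pairwise_cons.mp hu).1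
      have hpw_rest : rest.Pairwise (· ≤ ·) := (List.pairwise_cons.mp hu).2
      have hpd : (rest.dropWhile (fun y => x == y)).Pairwise (· ≤ ·) :=
        List.Pairwise.sublist (List.dropWhile_sublist _) hpw_rest
      set t := rest.takeWhile (fun y => x == y) with ht
      set d := rest.dropWhile (fun y => x == y) with hd
      have hrest : t ++ d = rest := List.takeWhile_append_dropWhile
      have ht_eq : ∀ y ∈ t, x = y := fun y hy => by
        have := List.mem_takeWhile_imp hy; simpa using this
      have hxd : ∀ z ∈ d, x < z := by
        intro z hz
        cases hdc : d with
        | nil => rw [hdc] at hz; simp at hz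
        | cons y d' =>
            have hmemrest : ∀ w ∈ d, w ∈ rest := fun w hw => (List.dropWhile_sublist _).mem hw
            have hdc' : rest.dropWhile (fun y => x == y) = y :: d' := hd.symm.trans hdc
            have hy_false : (fun y => x == y) y = false := by
              have h2 : (rest.dropWhile (fun y => x == y)).head (by simp [hdc']) = y := by
                simp [hdc']
              rw [← h2]
              exact List.head_dropWhile_not (p := (fun y => x == y)) (l := rest) _
            have hxy : x < y := by
              have hne : x ≠ y := by simpa using hy_false
              exact lt_of_le_of_ne (hxle y (hmemrest y (by rw [hdc]; simp))) hne
            rw [hdc] at hz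
            rcases List.mem_cons.mp hz with rfl | hz'
            · exact hxy
            · have hyd : y ≤ z := by
                have : (y :: d').Pairwise (· ≤ ·) := hdc ▸ hpd
                exact (List.pairwise_cons.mp this).1 z hz'
              exact lt_of_lt_of_le hxy hyd
      have hxnd : x ∉ d := fun hx => lt_irrefl x (hxd x hx)
      have hcount_x : (x :: rest).count x = 1 + t.length := by
        rw [← hrest]
        have h1 : t.count x = t.length := List.count_eq_length.mpr (fun b hb => ht_eq b hb)
        have h2 : d.count x = 0 := List.count_eq_zero.mpr hxnd
        simp [h1, h2]
        omega
      have hcount_ne : ∀ k ∈ d, (x :: rest).count k = d.count k := by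
        intro k hk
        have hkx : k ≠ x := fun h => hxnd (h ▸ hk)
        have h1 : t.count k = 0 := List.count_eq_zero.mpr (fun hkt => hkx ((ht_eq k hkt).symm))
        rw [← hrest]
        simp [List.count_append, h1, Ne.symm hkx]
      have hndd : (PySem.Set.ofList d).Nodup := PySem.Set.nodup_ofList d
      have hnds : (PySem.List.sorted (PySem.Set.ofList d) (fun x => x) false).Nodup :=
        (PySem.List.sorted_perm (PySem.Set.ofList d) (fun x => x) false).symm.nodup hndd
      have hmem_sd : ∀ z, z ∈ PySem.List.sorted (PySem.Set.ofList d) (fun x => x) false ↔ z ∈ d := by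
        intro z
        rw [PySem.List.mem_sorted]
        exact PySem.Set.mem_ofList d z
      have hset : PySem.List.sorted (PySem.Set.ofList (x :: rest)) (fun x => x) false
          = x :: PySem.List.sorted (PySem.Set.ofList d) (fun x => x) false := by
        apply PySem.List.sorted_eq_of_perm_of_pairwise_lt
        · rw [List.perm_ext_iff_of_nodup
            (List.nodup_cons.mpr ⟨fun hx => hxnd ((hmem_sd x).mp hx), hnds⟩)
            (PySem.Set.nodup_ofList _)]
          intro a
          rw [List.mem_cons, hmem_sd a, PySem.Set.mem_ofList]
          constructor
          · rintro (rfl | h)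
            · simp
            · rw [← hrest]; simp [h]
          · intro h
            rcases List.mem_cons.mp h with rfl | h
            · left; rfl
            · rw [← hrest] at h
              rcases List.mem_append.mp h with h | h
              · left; exact (ht_eq a h).symm
              · right; exact h
        · exact List.pairwise_cons.mpr ⟨fun z hz => hxd z ((hmem_sd z).mp hz),
            PySem.List.sorted_ofList_pairwise_lt d⟩
      rw [pvGroupRuns, hset]
      simp only [List.map_cons]
      rw [ih hpd]
      congr 1
      · have : ((x :: rest).count x : Int) = 1 + (t.length : Int) := by rw [hcount_x]; push_cast; ring
        rw [this]
      · exact (List.map_congr_left (fun k hk => by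
          rw [hcount_ne k ((hmem_sd k).mp hk)])).symm

-- left fold of ++ starting at s pulls s out front
lemma pv_foldl_append (l : List String) : ∀ s : String,
    l.foldl (fun r t => r ++ t) s = s ++ l.foldl (fun r t => r ++ t) "" := by
  induction l with
  | nil => intro s; simp
  | cons a l ih =>
      intro s
      simp only [List.foldl_cons]
      rw [ih (s ++ a), ih ("" ++ a), String.append_assoc]
      simp

-- string fold over rows = header ++ join of formatted rows
lemma pv_foldl_row (row : (String × Int) → String) :
    ∀ (L : List (String × Int)) (h : String),
    L.foldl (fun t kc => t ++ row kc) h = h ++ String.join (L.map row) := by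
  intro L
  induction L with
  | nil => intro h; simp [String.join]
  | cons kc L ih =>
      intro h
      simp only [List.foldl_cons, List.map_cons, ih]
      simp only [String.join, List.foldl_cons]
      rw [pv_foldl_append (List.map row L) ("" ++ row kc), String.append_assoc]
      simp

-- ===== VERDICT (by name: the statement is the Claim_ definition above) =====
theorem generate_policy_table_py_spec : Claim_equal_generate_policy_table_py := by
  intro analysis _
  unfold Spec_generate_policy_table_py generate_policy_table_py generate_policy_table_py_alt
  set policies := (PySem.Dict.mk analysis).getD "policies_analysis" [] with hp
  by_cases h : policies = []
  · simp [h]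
  · rw [if_neg h, if_neg h]
    set ts := policies.map (fun p => (PySem.Dict.mk p).getD "policy_type" "Unknown") with hts
    have hA : policies.foldl (fun d p =>
        let ptype := (PySem.Dict.mk p).getD "policy_type" "Unknown"
        d.insert ptype (d.getD ptype 0 + 1)) (PySem.Dict.empty : PySem.Dict String Int)
        = PySem.Dict.counter ts := by
      rw [← PySem.Dict.foldl_insert_getD_add_one_eq_counter, hts, List.foldl_map]
    dsimp only
    rw [hA, PySem.Dict.items_counter,
      pv_sorted2_eq_sorted_fst (PySem.Set.ofList ts) (fun k => (ts.count k : Int))]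
    have hmapsort : PySem.List.sorted ((PySem.Set.ofList ts).map (fun k => (k, (ts.count k : Int)))) Prod.fst false
        = (PySem.List.sorted (PySem.Set.ofList ts) (fun x => x) false).map (fun k => (k, (ts.count k : Int))) := by
      apply PySem.List.sorted_eq_of_perm_of_pairwise_lt
      · exact (PySem.List.sorted_perm _ _ _).map _
      · exact List.Pairwise.map _ (fun a b hab => hab) (PySem.List.sorted_ofList_pairwise_lt ts)
    rw [hmapsort]
    have hu : (PySem.List.sorted ts (fun x => x) false).Pairwise (· ≤ ·) :=
      PySem.List.sorted_pairwise ts (fun x => x)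
    rw [pv_groupRuns_sorted _ hu]
    have hperm : (PySem.List.sorted ts (fun x => x) false).Perm ts :=
      PySem.List.sorted_perm ts (fun x => x) false
    have hsets : PySem.List.sorted (PySem.Set.ofList (PySem.List.sorted ts (fun x => x) false)) (fun x => x) false
        = PySem.List.sorted (PySem.Set.ofList ts) (fun x => x) false := by
      apply PySem.List.sorted_eq_sorted_of_perm _ _ _ (fun _ _ hab => hab)
      rw [List.perm_ext_iff_of_nodup (PySem.Set.nodup_ofList _) (PySem.Set.nodup_ofList _)]
      intro a
      rw [PySem.Set.mem_ofList, PySem.Set.mem_ofList, PySem.List.mem_sorted]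
    rw [hsets,
      List.map_congr_left (fun k _ => by rw [hperm.count_eq k] :
        ∀ k ∈ PySem.List.sorted (PySem.Set.ofList ts) (fun x => x) false,
          (k, ((PySem.List.sorted ts (fun x => x) false).count k : Int)) = (k, (ts.count k : Int)))]
    exact pv_foldl_row _ _ _
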